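-- pv_equiv track=rewrite | github.com/st-hol/python-labs | PythonFundamentals/lab7/805.py | search_small_groups
-- ===== SOURCE A (Python) =====
-- def search_small_groups(string):
--     """
--           :Tests:
--           >>> search_small_groups("fdasaAAAdsfSffas")=="fdasa..........."
--           True
--           >>> search_small_groups("fdasafffas")=="fdasafffas"
--           True
--           >>> search_small_groups("Affsa")=="....."
--           True
--        """
--     i=0
--     lowercase = string.islower()
--     while i < len(string):
--         if lowercase:
--             return string
--             # i += 1
--             # continue
--
--         elif string[i].isupper():
--             app = ['.' for i in range(len(string)-i)]
--             string = string[:i] + ''.join(app)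
--             break
--         i += 1
--     return string
-- ===== SOURCE B (Python) =====
-- def search_small_groups(string):
--     out = []
--     seen = False
--     for c in string:
--         if seen or c.isupper():
--             seen = True
--             out.append('.')
--         else:
--             out.append(c)
--     return ''.join(out)
-- ===== Notes on version B (the rewrite author's own statement) =====
-- stated objective: simpler
-- what changed: Replaced the find-first-uppercase-then-slice-and-pad two-phase scan (with a redundant islower pre-check) by a single stateful pass with a boolean flag that emits a dot for every character from the first uppercase one onward.
import Mathlib
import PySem

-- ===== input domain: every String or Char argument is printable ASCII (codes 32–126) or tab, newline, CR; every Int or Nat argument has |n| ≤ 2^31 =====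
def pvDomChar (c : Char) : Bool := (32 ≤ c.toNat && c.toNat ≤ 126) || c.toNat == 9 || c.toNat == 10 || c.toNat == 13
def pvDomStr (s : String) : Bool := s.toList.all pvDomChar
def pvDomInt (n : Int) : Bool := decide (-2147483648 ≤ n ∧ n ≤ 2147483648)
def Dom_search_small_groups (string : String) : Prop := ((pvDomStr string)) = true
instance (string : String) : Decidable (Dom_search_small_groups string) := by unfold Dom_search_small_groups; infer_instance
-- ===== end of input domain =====

-- B changes A's two-phase find-first-uppercase-then-slice-and-pad scan into one
-- stateful pass with a boolean flag (objective: simpler); same return value on all inputs.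

-- ===== PORT A =====
-- the while-loop of A, recursing on the index i (terminates since len - i decreases);
-- string[i] is in range at the read, so getD with a dummy default is exact there
def aLoop (l : List Char) (lowercase : Bool) (i : Nat) : List Char :=
  if _h : i < l.length then
    if lowercase then l
    else if PySem.Chars.isupper (l.getD i ' ') then
      -- app = ['.' for _ in range(len(string)-i)]; string = string[:i] + ''.join(app); break
      PySem.List.slice l none (some ((i : Nat) : Int)) ++
        (PySem.List.pyRange 0 ((l.length - i : Nat) : Int) 1).map (fun _ => '.')
    else aLoop l lowercase (i + 1)
  else l
termination_by l.length - i

def search_small_groups (string : String) : String :=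
  -- string.islower(): all cased chars lowercase and at least one cased char;
  -- hand-ported (exact on the printable-ASCII domain, where cased = alpha)
  let lowercase := string.toList.any PySem.Chars.islower &&
                   string.toList.all (fun c => !PySem.Chars.isupper c)
  String.mk (aLoop string.toList lowercase 0)

-- ===== PORT B =====
def altGo : List Char → Bool → List Char
  | [], _ => []
  | c :: cs, seen =>
    if seen || PySem.Chars.isupper c then '.' :: altGo cs true else c :: altGo cs seen

def search_small_groups_alt (string : String) : String :=
  String.mk (altGo string.toList false)

-- ===== PRECONDITION & SPEC =====
def Spec_search_small_groups (string : String) (out : String) : Prop := out = search_small_groups_alt string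
instance (string : String) (out : String) : Decidable (Spec_search_small_groups string out) := by unfold Spec_search_small_groups; infer_instance

-- ===== CLAIM (what is proved, stated in full; the proofs are below) =====
def Claim_equal_search_small_groups : Prop := ∀ (string : String), Dom_search_small_groups string → Spec_search_small_groups string (search_small_groups string)

-- ===== LEMMAS AND PROOFS =====

theorem aLoop_true (l : List Char) (i : Nat) : aLoop l true i = l := by
  rw [aLoop]; split <;> simp

theorem altGo_true (l : List Char) : altGo l true = List.replicate l.length '.' := by
  induction l with
  | nil => rfl
  | cons c cs ih => simp [altGo, ih, List.replicate_succ]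

theorem altGo_noupper (l : List Char) (h : ∀ c ∈ l, PySem.Chars.isupper c = false) :
    altGo l false = l := by
  induction l with
  | nil => rfl
  | cons c cs ih =>
    rw [altGo, h c (by simp)]
    simp only [Bool.false_or, Bool.false_eq_true, if_false]
    rw [ih fun d hd => h d (List.mem_cons_of_mem _ hd)]

theorem map_pyRange_replicate (n : Nat) :
    (PySem.List.pyRange 0 ((n : Nat) : Int) 1).map (fun _ => '.') = List.replicate n '.' := by
  simp [PySem.List.pyRange_one, List.map_map, List.eq_replicate_iff]

theorem aLoop_eq (l : List Char) (i : Nat)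
    (h : ∀ c ∈ l.take i, PySem.Chars.isupper c = false) :
    aLoop l false i = l.take i ++ altGo (l.drop i) false := by
  by_cases hi : i < l.length
  · rw [aLoop]
    simp only [dif_pos hi, Bool.false_eq_true, if_false]
    have hget : l.getD i ' ' = l[i] := List.getD_eq_getElem l ' ' hi
    have hdrop : l.drop i = l[i] :: l.drop (i + 1) := List.drop_eq_getElem_cons hi
    by_cases hu : PySem.Chars.isupper l[i] = true
    · rw [if_pos (hget ▸ hu), hdrop]
      simp only [altGo, hu, Bool.false_or, if_true]
      rw [altGo_true, map_pyRange_replicate, PySem.List.slice_to_natCast]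
      have hlen : (l.drop (i + 1)).length = l.length - (i + 1) := List.length_drop
      rw [hlen]
      have : l.length - i = (l.length - (i + 1)) + 1 := by omega
      rw [this, List.replicate_succ]
    · rw [if_neg (by rw [hget]; exact hu)]
      rw [aLoop_eq l (i + 1)
        (by intro c hc
            rw [List.take_succ_eq_append_getElem hi] at hc
            rcases List.mem_append.mp hc with h1 | h1
            · exact h c h1
            · simp at h1; subst h1; simpa using hu)]
      rw [List.take_succ_eq_append_getElem hi, hdrop]
      simp [altGo, hu]
      rw [List.take_succ_eq_append_getElem hi, List.append_assoc]
      rfl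
  · rw [aLoop]
    simp only [dif_neg hi]
    rw [List.take_of_length_le (by omega), List.drop_of_length_le (by omega)]
    simp [altGo]
termination_by l.length - i

-- ===== VERDICT (by name: the statement is the Claim_ definition above) =====
theorem search_small_groups_spec : Claim_equal_search_small_groups := by
  intro s _
  unfold Spec_search_small_groups search_small_groups search_small_groups_alt
  show String.mk (aLoop s.toList
      (s.toList.any PySem.Chars.islower && s.toList.all fun c => !PySem.Chars.isupper c) 0) =
    String.mk (altGo s.toList false)
  by_cases hlow : (s.toList.any PySem.Chars.islower &&
      s.toList.all (fun c => !PySem.Chars.isupper c)) = true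
  · have hnoup : ∀ c ∈ s.toList, PySem.Chars.isupper c = false := by
      have := (Bool.and_eq_true ..).mp hlow |>.2
      intro c hc
      simpa using List.all_eq_true.mp this c hc
    rw [altGo_noupper _ hnoup, hlow, aLoop_true]
  · rw [Bool.not_eq_true] at hlow
    rw [hlow, aLoop_eq s.toList 0 (by simp)]
    simp
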